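-- pv_equiv track=rewrite | github.com/shibing624/nlpcommon | nlpcommon/text.py | text_segmentate
-- ===== SOURCE A (Python) =====
-- def text_segmentate(text, maxlen, seps='\n', strips=None):
--     """将文本按照标点符号划分为若干个短句
--     """
--     text = text.strip().strip(strips)
--     if seps and len(text) > maxlen:
--         pieces = text.split(seps[0])
--         text, texts = '', []
--         for i, p in enumerate(pieces):
--             if text and p and len(text) + len(p) > maxlen - 1:
--                 texts.extend(text_segmentate(text, maxlen, seps[1:], strips))
--                 text = ''
--             if i + 1 == len(pieces):
--                 text = text + p
--             else:
--                 text = text + p + seps[0]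
--         if text:
--             texts.extend(text_segmentate(text, maxlen, seps[1:], strips))
--         return texts
--     return [text]
-- ===== SOURCE B (Python) =====
-- def text_segmentate(text, maxlen, seps='\n', strips=None):
--     """将文本按照标点符号划分为若干个短句 — iterative level-by-level version"""
--     segments = [(text, False)]
--     for sep in seps:
--         nxt = []
--         for s, done in segments:
--             if done:
--                 nxt.append((s, True))
--                 continue
--             s = s.strip().strip(strips)
--             if len(s) <= maxlen:
--                 nxt.append((s, True))
--                 continue
--             pieces = s.split(sep)
--             acc = ''
--             for i, p in enumerate(pieces):
--                 if acc and p and len(acc) + len(p) > maxlen - 1: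
--                     nxt.append((acc, False))
--                     acc = ''
--                 acc = acc + p if i + 1 == len(pieces) else acc + p + sep
--             if acc:
--                 nxt.append((acc, False))
--         segments = nxt
--     return [s if done else s.strip().strip(strips) for s, done in segments]
-- ===== Notes on version B (the rewrite author's own statement) =====
-- stated objective: alternative
-- what changed: Replaces A's separator-indexed recursion (each flushed chunk recursing with seps[1:]) by an iterative level-by-level pass over the separators that carries done-tagged segments, splitting oversized segments in place and stripping the untagged ones in a final pass.
import Mathlib
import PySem

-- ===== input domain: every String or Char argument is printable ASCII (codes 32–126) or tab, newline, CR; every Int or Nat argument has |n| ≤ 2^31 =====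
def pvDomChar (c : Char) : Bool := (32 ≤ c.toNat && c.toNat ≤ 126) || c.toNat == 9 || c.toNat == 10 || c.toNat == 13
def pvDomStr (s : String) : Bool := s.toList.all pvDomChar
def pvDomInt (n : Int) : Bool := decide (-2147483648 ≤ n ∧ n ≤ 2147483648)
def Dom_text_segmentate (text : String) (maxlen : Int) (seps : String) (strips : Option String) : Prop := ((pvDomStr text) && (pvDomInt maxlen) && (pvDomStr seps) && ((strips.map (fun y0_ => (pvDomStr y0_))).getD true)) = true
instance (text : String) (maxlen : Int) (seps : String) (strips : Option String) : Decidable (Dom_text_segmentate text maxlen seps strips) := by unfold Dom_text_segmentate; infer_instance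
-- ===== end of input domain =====

-- B replaces A's separator-indexed recursion by an iterative level-by-level pass over the
-- separators with done-tagged segments (same cost, different decomposition: 'alternative').

-- ===== PORT A =====
-- text.strip().strip(strips): strip(None) is plain strip (exact port of the two chained strips)
def pvStrip2 (t : List Char) (strips : Option (List Char)) : List Char :=
  match strips with
  | none => PySem.Chars.strip (PySem.Chars.strip t)
  | some cs => PySem.Chars.stripChars (PySem.Chars.strip t) cs

-- A's recursion: strip, and while 'seps and len(text) > maxlen', split on seps[0] and greedily
-- re-accumulate pieces, recursing with seps[1:] on each flushed chunk (exact transliteration).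
def pvAimpl (text : List Char) (maxlen : Int) (seps : List Char) (strips : Option (List Char)) : List (List Char) :=
  let t := pvStrip2 text strips
  match seps with
  | [] => [t]
  | s0 :: rest =>
    if (t.length : Int) > maxlen then
      let pieces := PySem.Chars.splitOn t [s0]
      let n := pieces.length
      let st := (PySem.List.enumerate pieces 0).foldl
        (fun (st : List Char × List (List Char)) ip =>
          let st :=
            if st.1 ≠ [] ∧ ip.2 ≠ [] ∧ (st.1.length : Int) + (ip.2.length : Int) > maxlen - 1 then
              (([] : List Char), st.2 ++ pvAimpl st.1 maxlen rest strips)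
            else st
          if ip.1 + 1 = (n : Int) then (st.1 ++ ip.2, st.2)
          else (st.1 ++ ip.2 ++ [s0], st.2)) (([] : List Char), ([] : List (List Char)))
      if st.1 ≠ [] then st.2 ++ pvAimpl st.1 maxlen rest strips else st.2
    else [t]
termination_by seps.length
decreasing_by all_goals simp

def text_segmentate (text : String) (maxlen : Int) (seps : String) (strips : Option String) : List String :=
  (pvAimpl text.toList maxlen seps.toList (strips.map String.toList)).map String.ofList

-- ===== PORT B =====
-- Source B's greedy inner loop: same accumulation, but chunks are collected into a list
def pvGreedy (maxlen : Int) (sep : Char) (pieces : List (List Char)) : List (List Char) :=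
  let n := pieces.length
  let st := (PySem.List.enumerate pieces 0).foldl
    (fun (st : List Char × List (List Char)) ip =>
      let st :=
        if st.1 ≠ [] ∧ ip.2 ≠ [] ∧ (st.1.length : Int) + (ip.2.length : Int) > maxlen - 1 then
          (([] : List Char), st.2 ++ [st.1])
        else st
      if ip.1 + 1 = (n : Int) then (st.1 ++ ip.2, st.2)
      else (st.1 ++ ip.2 ++ [sep], st.2)) (([] : List Char), ([] : List (List Char)))
  if st.1 ≠ [] then st.2 ++ [st.1] else st.2

-- processing of one done-tagged segment at one separator level
def pvStepSeg (maxlen : Int) (strips : Option (List Char)) (sep : Char) (seg : List Char × Bool) : List (List Char × Bool) :=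
  if seg.2 then [seg]
  else
    let s := pvStrip2 seg.1 strips
    if (s.length : Int) ≤ maxlen then [(s, true)]
    else (pvGreedy maxlen sep (PySem.Chars.splitOn s [sep])).map (fun c => (c, false))

def text_segmentate_alt (text : String) (maxlen : Int) (seps : String) (strips : Option String) : List String :=
  let st := strips.map String.toList
  let segs := seps.toList.foldl
    (fun segs sep => segs.flatMap (pvStepSeg maxlen st sep)) [(text.toList, false)]
  segs.map (fun sd => String.ofList (if sd.2 then sd.1 else pvStrip2 sd.1 st))

-- ===== PRECONDITION & SPEC =====
def Spec_text_segmentate (text : String) (maxlen : Int) (seps : String) (strips : Option String) (out : List String) : Prop := out = text_segmentate_alt text maxlen seps strips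
instance (text : String) (maxlen : Int) (seps : String) (strips : Option String) (out : List String) : Decidable (Spec_text_segmentate text maxlen seps strips out) := by unfold Spec_text_segmentate; infer_instance

-- ===== CLAIM (what is proved, stated in full; the proofs are below) =====
def Claim_equal_text_segmentate : Prop := ∀ (text : String) (maxlen : Int) (seps : String) (strips : Option String), Dom_text_segmentate text maxlen seps strips → Spec_text_segmentate text maxlen seps strips (text_segmentate text maxlen seps strips)

-- ===== LEMMAS AND PROOFS =====

-- one level of B's iteration
def pvLevel (maxlen : Int) (strips : Option (List Char)) (segs : List (List Char × Bool)) (sep : Char) : List (List Char × Bool) :=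
  segs.flatMap (pvStepSeg maxlen strips sep)

-- B's final strip-and-untag pass
def pvFinal (strips : Option (List Char)) (segs : List (List Char × Bool)) : List (List Char) :=
  segs.map (fun sd => if sd.2 then sd.1 else pvStrip2 sd.1 strips)

-- the levels distribute over appended segment lists
theorem pvLevels_append (maxlen : Int) (strips : Option (List Char)) (seps : List Char) :
    ∀ xs ys : List (List Char × Bool),
      seps.foldl (pvLevel maxlen strips) (xs ++ ys)
        = seps.foldl (pvLevel maxlen strips) xs ++ seps.foldl (pvLevel maxlen strips) ys := by
  induction seps with
  | nil => intro xs ys; rfl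
  | cons c rest ih =>
      intro xs ys
      simp only [List.foldl_cons]
      rw [show pvLevel maxlen strips (xs ++ ys) c
            = pvLevel maxlen strips xs c ++ pvLevel maxlen strips ys c by
          simp [pvLevel]]
      exact ih _ _

-- a done segment passes through every level unchanged
theorem pvLevels_done (maxlen : Int) (strips : Option (List Char)) (seps : List Char) (t : List Char) :
    seps.foldl (pvLevel maxlen strips) [(t, true)] = [(t, true)] := by
  induction seps with
  | nil => rfl
  | cons c rest ih => simpa [pvLevel, pvStepSeg] using ih

-- A's greedy fold with inline recursion g equals B's chunk-collecting fold followed by flatMap g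
theorem pvFold_bridge (maxlen : Int) (s0 : Char) (n : Nat) (g : List Char → List (List Char)) :
    ∀ (l : List (Int × List Char)) (cur : List Char) (accB : List (List Char)),
      l.foldl
        (fun (st : List Char × List (List Char)) ip =>
          let st :=
            if st.1 ≠ [] ∧ ip.2 ≠ [] ∧ (st.1.length : Int) + (ip.2.length : Int) > maxlen - 1 then
              (([] : List Char), st.2 ++ g st.1)
            else st
          if ip.1 + 1 = (n : Int) then (st.1 ++ ip.2, st.2)
          else (st.1 ++ ip.2 ++ [s0], st.2)) (cur, accB.flatMap g)
      = (((l.foldl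
          (fun (st : List Char × List (List Char)) ip =>
            let st :=
              if st.1 ≠ [] ∧ ip.2 ≠ [] ∧ (st.1.length : Int) + (ip.2.length : Int) > maxlen - 1 then
                (([] : List Char), st.2 ++ [st.1])
              else st
            if ip.1 + 1 = (n : Int) then (st.1 ++ ip.2, st.2)
            else (st.1 ++ ip.2 ++ [s0], st.2)) (cur, accB)).1),
         ((l.foldl
          (fun (st : List Char × List (List Char)) ip =>
            let st :=
              if st.1 ≠ [] ∧ ip.2 ≠ [] ∧ (st.1.length : Int) + (ip.2.length : Int) > maxlen - 1 then
                (([] : List Char), st.2 ++ [st.1])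
              else st
            if ip.1 + 1 = (n : Int) then (st.1 ++ ip.2, st.2)
            else (st.1 ++ ip.2 ++ [s0], st.2)) (cur, accB)).2).flatMap g) := by
  intro l
  induction l with
  | nil => intro cur accB; rfl
  | cons ip rest ih =>
      intro cur accB
      simp only [List.foldl_cons]
      by_cases h : cur ≠ [] ∧ ip.2 ≠ [] ∧ (cur.length : Int) + (ip.2.length : Int) > maxlen - 1
      · by_cases h2 : ip.1 + 1 = (n : Int)
        · simpa [h, h2] using ih ip.2 (accB ++ [cur])
        · simpa [h, h2] using ih (ip.2 ++ [s0]) (accB ++ [cur])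
      · have h' : ¬(¬cur = [] ∧ ¬ip.2 = [] ∧ maxlen ≤ (cur.length : Int) + (ip.2.length : Int)) := by
          rintro ⟨a, b, c⟩; exact h ⟨a, b, by omega⟩
        by_cases h2 : ip.1 + 1 = (n : Int)
        · simpa [h, h', h2] using ih (cur ++ ip.2) accB
        · simpa [h, h', h2] using ih (cur ++ ip.2 ++ [s0]) accB

-- levels over a list of fresh (untagged) chunks = per-chunk levels, concatenated
theorem pvLevels_flatMapSingles (maxlen : Int) (strips : Option (List Char)) (seps : List Char) :
    ∀ chunks : List (List Char),
      seps.foldl (pvLevel maxlen strips) (chunks.map (fun ch => (ch, false)))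
        = chunks.flatMap (fun ch => seps.foldl (pvLevel maxlen strips) [(ch, false)]) := by
  intro chunks
  induction chunks with
  | nil =>
      induction seps with
      | nil => rfl
      | cons c rest ih => simpa [pvLevel] using ih
  | cons ch tl ih =>
      rw [show ((ch :: tl).map fun ch => (ch, false)) = [(ch, false)] ++ tl.map (fun ch => (ch, false)) by simp]
      rw [pvLevels_append, ih, List.flatMap_cons]

-- A at a separator level, when the stripped text fits
theorem pvAimpl_cons_fit (maxlen : Int) (strips : Option (List Char)) (c : Char) (rest : List Char)
    (t : List Char) (h : ¬ maxlen < ((pvStrip2 t strips).length : Int)) :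
    pvAimpl t maxlen (c :: rest) strips = [pvStrip2 t strips] := by
  rw [pvAimpl]
  simp only [gt_iff_lt, if_neg h]

-- A at a separator level, when the stripped text is too long: A's fold with inline recursion
-- equals B's greedy chunks with the recursion flat-mapped over them (via pvFold_bridge)
theorem pvAimpl_cons_big (maxlen : Int) (strips : Option (List Char)) (c : Char) (rest : List Char)
    (t : List Char) (h : maxlen < ((pvStrip2 t strips).length : Int)) :
    pvAimpl t maxlen (c :: rest) strips
      = (pvGreedy maxlen c (PySem.Chars.splitOn (pvStrip2 t strips) [c])).flatMap
          (fun ch => pvAimpl ch maxlen rest strips) := by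
  rw [pvAimpl]
  simp only [gt_iff_lt, if_pos h]
  have hb := pvFold_bridge maxlen c (PySem.Chars.splitOn (pvStrip2 t strips) [c]).length
    (fun ch => pvAimpl ch maxlen rest strips)
    (PySem.List.enumerate (PySem.Chars.splitOn (pvStrip2 t strips) [c]) 0) [] []
  simp only [List.flatMap_nil] at hb
  rw [hb]
  simp only [pvGreedy]
  split
  · next hne => simp
  · next hne => simp

-- the two sides of pvStepSeg on an untagged segment
theorem pvStepSeg_fit (maxlen : Int) (strips : Option (List Char)) (c : Char) (t : List Char)
    (h : ((pvStrip2 t strips).length : Int) ≤ maxlen) :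
    pvStepSeg maxlen strips c (t, false) = [(pvStrip2 t strips, true)] := by
  simp [pvStepSeg, h]

theorem pvStepSeg_big (maxlen : Int) (strips : Option (List Char)) (c : Char) (t : List Char)
    (h : ¬ ((pvStrip2 t strips).length : Int) ≤ maxlen) :
    pvStepSeg maxlen strips c (t, false)
      = (pvGreedy maxlen c (PySem.Chars.splitOn (pvStrip2 t strips) [c])).map (fun ch => (ch, false)) := by
  simp [pvStepSeg, h]

-- the core lemma: A's recursion = B's remaining levels followed by the final pass
theorem pvAimpl_eq_levels (maxlen : Int) (strips : Option (List Char)) :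
    ∀ (seps : List Char) (t : List Char),
      pvAimpl t maxlen seps strips
        = pvFinal strips (seps.foldl (pvLevel maxlen strips) [(t, false)]) := by
  intro seps
  induction seps with
  | nil => intro t; simp [pvAimpl, pvFinal]
  | cons c rest ih =>
      intro t
      have hlvl : pvLevel maxlen strips [(t, false)] c = pvStepSeg maxlen strips c (t, false) := by
        simp [pvLevel]
      by_cases hfit : ((pvStrip2 t strips).length : Int) ≤ maxlen
      · rw [pvAimpl_cons_fit maxlen strips c rest t (by omega), List.foldl_cons, hlvl,
            pvStepSeg_fit maxlen strips c t hfit, pvLevels_done]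
        simp [pvFinal]
      · rw [pvAimpl_cons_big maxlen strips c rest t (by omega), List.foldl_cons, hlvl,
            pvStepSeg_big maxlen strips c t hfit, pvLevels_flatMapSingles]
        rw [show ((pvGreedy maxlen c (PySem.Chars.splitOn (pvStrip2 t strips) [c])).flatMap
              (fun ch => pvAimpl ch maxlen rest strips))
            = ((pvGreedy maxlen c (PySem.Chars.splitOn (pvStrip2 t strips) [c])).flatMap
              (fun ch => pvFinal strips (rest.foldl (pvLevel maxlen strips) [(ch, false)]))) from
          List.flatMap_congr (fun ch _ => ih ch)]
        simp [pvFinal, List.map_flatMap]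

-- ===== VERDICT (by name: the statement is the Claim_ definition above) =====
theorem text_segmentate_spec : Claim_equal_text_segmentate := by
  intro text maxlen seps strips _
  unfold Spec_text_segmentate text_segmentate text_segmentate_alt
  rw [pvAimpl_eq_levels]
  simp only [pvFinal, List.map_map, Function.comp_def]
  rfl
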